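-- pv_equiv track=rewrite | github.com/jxie0755/helloSping2018 | coor_path_search.py | move_translate
-- ===== SOURCE A (Python) =====
-- def move_translate(coor_1, coor_2, moves):
--     """translate moves into a route list of coordinates
--
--     coor_1: a tuple to represent coordination (x, y)
--     coor_2: a tuple to represent coordination (x, y)
--     moves: a tuple represents the movement, example: ('R', 'U', 'R', 'U')
--
--     return: a list of tuples, each tuple represent a cooridnate, as start follows the direction of moves
--     """
--
--     # determine the direction:
--     ordered_coor_list = [coor_1, coor_2]
--     start, end = sorted(ordered_coor_list)[0], sorted(ordered_coor_list)[1]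
--
--     path = [start]
--     current = start
--     for move in moves:
--         if move == 'R':
--             current = (current[0] + 1, current[1])
--         elif move == 'U':
--             current = (current[0], current[1] + 1)
--         elif move == 'D':
--             current = (current[0], current[1] - 1)
--         path.append(current)
--     return path
-- ===== SOURCE B (Python) =====
-- def _count_before(positions, i):
--     """Number of entries of the ascending list `positions` that are < i (binary search)."""
--     lo, hi = 0, len(positions)
--     while lo < hi:
--         mid = (lo + hi) // 2
--         if positions[mid] < i:
--             lo = mid + 1
--         else:
--             hi = mid
--     return lo
--
--
-- def move_translate(coor_1, coor_2, moves):
--     """Index the positions of each move kind once, then read every path point off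
--     in closed form: point i = start + (#R before i, #U before i - #D before i),
--     each count obtained by binary search -- no running accumulator."""
--     x0, y0 = min(coor_1, coor_2)
--     rs = [j for j, m in enumerate(moves) if m == 'R']
--     us = [j for j, m in enumerate(moves) if m == 'U']
--     ds = [j for j, m in enumerate(moves) if m == 'D']
--     return [(x0 + _count_before(rs, i),
--              y0 + _count_before(us, i) - _count_before(ds, i))
--             for i in range(len(moves) + 1)]
-- ===== Notes on version B (the rewrite author's own statement) =====
-- stated objective: alternative
-- what changed: Replaces A's stateful accumulation loop by a closed-form per-index computation: the positions of R/U/D moves are indexed once, and each path point is start plus the binary-searched counts of moves occurring before that index.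
import Mathlib
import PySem

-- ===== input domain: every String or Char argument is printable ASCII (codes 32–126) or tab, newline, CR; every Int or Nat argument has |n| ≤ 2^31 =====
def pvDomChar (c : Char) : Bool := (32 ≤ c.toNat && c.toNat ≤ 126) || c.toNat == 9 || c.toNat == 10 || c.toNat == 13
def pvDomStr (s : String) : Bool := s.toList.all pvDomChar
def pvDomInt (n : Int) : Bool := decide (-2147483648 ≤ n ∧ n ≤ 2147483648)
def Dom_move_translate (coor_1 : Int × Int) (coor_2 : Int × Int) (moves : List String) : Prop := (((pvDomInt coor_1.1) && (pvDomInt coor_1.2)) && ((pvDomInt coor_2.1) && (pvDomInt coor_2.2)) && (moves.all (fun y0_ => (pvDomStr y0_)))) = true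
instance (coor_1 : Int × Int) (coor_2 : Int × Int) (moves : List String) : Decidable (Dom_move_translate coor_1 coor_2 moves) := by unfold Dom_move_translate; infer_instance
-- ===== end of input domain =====

-- B replaces A's stateful accumulation loop by a closed form: index the R/U/D move
-- positions once, then binary-search the counts before each index (objective: alternative).


-- Python's `<=` on two (int, int) tuples: lexicographic. Exact for pairs of Ints.
def pyTupLe (a b : Int × Int) : Bool := decide (a.1 < b.1) || (a.1 == b.1 && decide (a.2 ≤ b.2))

-- loop body of A (the if/elif chain appending `current`), named for the proofs
def pvStepA (st : List (Int × Int) × (Int × Int)) (move : String) : List (Int × Int) × (Int × Int) :=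
  let current :=
    if move == "R" then (st.2.1 + 1, st.2.2)
    else if move == "U" then (st.2.1, st.2.2 + 1)
    else if move == "D" then (st.2.1, st.2.2 - 1)
    else st.2
  (st.1 ++ [current], current)

-- ===== PORT A =====
-- sorted([c1, c2]) on a 2-list under Python tuple order = swap iff not c1 <= c2; exact hand port for a 2-list
def move_translate (coor_1 : Int × Int) (coor_2 : Int × Int) (moves : List String) : List (Int × Int) :=
  let ordered_coor_list := [coor_1, coor_2]
  let sortedL := if pyTupLe coor_1 coor_2 then ordered_coor_list else [coor_2, coor_1]
  let start := sortedL.headI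
  let r := moves.foldl pvStepA ([start], start)
  r.1

-- ===== PORT B =====
-- _count_before's while-loop, step for step (Python `//` on the nonnegative lo+hi = Nat division)
def pvCountBeforeLoop (ps : List Int) (i : Int) (lo hi : Nat) : Nat :=
  if lo < hi then
    let mid := (lo + hi) / 2
    if PySem.List.pyGetD ps (mid : Int) 0 < i then pvCountBeforeLoop ps i (mid + 1) hi
    else pvCountBeforeLoop ps i lo mid
  else lo
termination_by hi - lo
decreasing_by all_goals omega

-- _count_before(positions, i)
def pvCountBefore (ps : List Int) (i : Int) : Nat := pvCountBeforeLoop ps i 0 ps.length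

-- [j for j, m in enumerate(moves) if m == v]
def pvPos (v : String) (moves : List String) : List Int :=
  (PySem.List.enumerate moves 0).filterMap (fun p => if p.2 == v then some p.1 else none)

def move_translate_alt (coor_1 : Int × Int) (coor_2 : Int × Int) (moves : List String) : List (Int × Int) :=
  -- min(coor_1, coor_2): Python tuple min, exact for pairs of Ints
  let start := if pyTupLe coor_1 coor_2 then coor_1 else coor_2
  let rs := pvPos "R" moves
  let us := pvPos "U" moves
  let ds := pvPos "D" moves
  (PySem.List.pyRange 0 ((moves.length : Int) + 1) 1).map (fun i =>
    (start.1 + (pvCountBefore rs i : Int),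
     start.2 + (pvCountBefore us i : Int) - (pvCountBefore ds i : Int)))

-- ===== PRECONDITION & SPEC =====
def Spec_move_translate (coor_1 : Int × Int) (coor_2 : Int × Int) (moves : List String) (out : List (Int × Int)) : Prop := out = move_translate_alt coor_1 coor_2 moves
instance (coor_1 : Int × Int) (coor_2 : Int × Int) (moves : List String) (out : List (Int × Int)) : Decidable (Spec_move_translate coor_1 coor_2 moves out) := by unfold Spec_move_translate; infer_instance

-- ===== CLAIM =====
def Claim_equal_move_translate : Prop := ∀ (coor_1 : Int × Int) (coor_2 : Int × Int) (moves : List String), Dom_move_translate coor_1 coor_2 moves → Spec_move_translate coor_1 coor_2 moves (move_translate coor_1 coor_2 moves)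

-- ===== LEMMAS AND PROOFS =====

-- the per-move displacement of A's if/elif chain
def pvDelta (m : String) : Int × Int :=
  if m == "R" then (1, 0) else if m == "U" then (0, 1) else if m == "D" then (0, -1) else (0, 0)

-- the path generated from `cur` by `moves` (excluding `cur` itself)
def pvScan (cur : Int × Int) : List String → List (Int × Int)
  | [] => []
  | m :: ms =>
    let c := (cur.1 + (pvDelta m).1, cur.2 + (pvDelta m).2)
    c :: pvScan c ms

-- the common closed form at index k
def pvIdx (s : Int × Int) (moves : List String) (k : Nat) : Int × Int :=
  (s.1 + ((moves.take k).count "R" : Int),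
   s.2 + ((moves.take k).count "U" : Int) - ((moves.take k).count "D" : Int))

lemma stepA_eq (path : List (Int × Int)) (cur : Int × Int) (m : String) :
    pvStepA (path, cur) m
      = (path ++ [(cur.1 + (pvDelta m).1, cur.2 + (pvDelta m).2)],
         (cur.1 + (pvDelta m).1, cur.2 + (pvDelta m).2)) := by
  simp only [pvStepA, pvDelta]
  split_ifs <;> (simp; try omega)

lemma foldA_eq (moves : List String) : ∀ (path : List (Int × Int)) (cur : Int × Int),
    (moves.foldl pvStepA (path, cur)).1 = path ++ pvScan cur moves := by
  induction moves with
  | nil => intro path cur; simp [pvScan]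
  | cons m ms ih =>
    intro path cur
    rw [List.foldl_cons, stepA_eq, ih]
    simp [pvScan]

lemma pvIdx_succ_cons (s : Int × Int) (m : String) (ms : List String) (k : Nat) :
    pvIdx s (m :: ms) (k + 1) = pvIdx (s.1 + (pvDelta m).1, s.2 + (pvDelta m).2) ms k := by
  simp only [pvIdx, List.take_succ_cons, List.count_cons, pvDelta]
  split_ifs <;> simp_all <;> ring

-- A's scan equals the closed form
lemma scan_eq_map (moves : List String) : ∀ (s : Int × Int),
    s :: pvScan s moves = (List.range (moves.length + 1)).map (pvIdx s moves) := by
  induction moves with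
  | nil => intro s; simp [pvScan, pvIdx]
  | cons m ms ih =>
    intro s
    rw [List.length_cons, List.range_succ_eq_map, List.map_cons, List.map_map]
    have h0 : pvIdx s (m :: ms) 0 = s := by simp [pvIdx]
    have hc : (pvIdx s (m :: ms)) ∘ Nat.succ
        = pvIdx (s.1 + (pvDelta m).1, s.2 + (pvDelta m).2) ms := by
      funext k; exact pvIdx_succ_cons s m ms k
    rw [h0, hc, ← ih]
    simp [pvScan]

-- the position lists are strictly increasing
lemma filterMap_if_fst (f : (Int × String) → Bool) (l : List (Int × String)) :
    l.filterMap (fun p => if f p then some p.1 else none) = (l.filter f).map Prod.fst := by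
  induction l with
  | nil => rfl
  | cons p t ih =>
    by_cases h : f p = true <;> simp [h, ih]

lemma pvPos_eq_map_filter (v : String) (moves : List String) :
    pvPos v moves = ((PySem.List.enumerate moves 0).filter (fun p => p.2 == v)).map Prod.fst := by
  unfold pvPos
  exact filterMap_if_fst (fun p => p.2 == v) _

lemma pvPos_pairwise (v : String) (moves : List String) : (pvPos v moves).Pairwise (· < ·) := by
  rw [pvPos_eq_map_filter]
  have hsub : List.Sublist
      (((PySem.List.enumerate moves 0).filter (fun p => p.2 == v)).map Prod.fst)
      ((PySem.List.enumerate moves 0).map Prod.fst) :=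
    List.filter_sublist.map Prod.fst
  have hall : ((PySem.List.enumerate moves 0).map Prod.fst).Pairwise (· < ·) := by
    have := PySem.List.map_fst_enumerate moves 0
    simp only [this]
    exact PySem.List.pairwise_lt_pyRange_one _ _
  exact hall.sublist hsub

-- for a strictly increasing list, `ps[k] < i` iff `k <` the number of entries `< i`
lemma sorted_lt_iff_countP (i : Int) : ∀ (ps : List Int), ps.Pairwise (· < ·) →
    ∀ (k : Nat) (hk : k < ps.length),
      (ps[k] < i ↔ k < ps.countP (fun x => decide (x < i))) := by
  intro ps
  induction ps with
  | nil => intro _ k hk; exact absurd hk (by simp)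
  | cons a t ih =>
    intro hpw k hk
    have ha := (List.pairwise_cons.mp hpw).1
    have ht := (List.pairwise_cons.mp hpw).2
    have hzero : ¬ a < i → t.countP (fun x => decide (x < i)) = 0 := by
      intro hna
      refine List.countP_eq_zero.mpr ?_
      intro x hx
      have : a < x := ha x hx
      simp only [decide_eq_true_eq]
      omega
    cases k with
    | zero =>
      simp only [List.getElem_cons_zero, List.countP_cons]
      by_cases hai : a < i
      · simp [hai]
      · simp [hai, hzero hai]
    | succ k =>
      have hk' : k < t.length := by simpa using hk
      have := ih ht k hk'
      simp only [List.getElem_cons_succ, List.countP_cons]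
      rw [this]
      by_cases hai : a < i
      · simp [hai]
      · simp [hai, hzero hai]

-- the binary-search loop returns the count, given the invariant lo ≤ c ≤ hi ≤ len
lemma loop_spec (ps : List Int) (i : Int) (hpw : ps.Pairwise (· < ·)) :
    ∀ (n lo hi : Nat), hi - lo ≤ n →
      lo ≤ ps.countP (fun x => decide (x < i)) →
      ps.countP (fun x => decide (x < i)) ≤ hi → hi ≤ ps.length →
      pvCountBeforeLoop ps i lo hi = ps.countP (fun x => decide (x < i)) := by
  intro n
  induction n with
  | zero =>
    intro lo hi hfuel hlo hhi _
    rw [pvCountBeforeLoop]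
    have : ¬ lo < hi := by omega
    simp [this]
    omega
  | succ n ih =>
    intro lo hi hfuel hlo hhi hlen
    rw [pvCountBeforeLoop]
    by_cases hlt : lo < hi
    · simp only [hlt, if_true]
      have hmid : (lo + hi) / 2 < ps.length := by omega
      have hget : PySem.List.pyGetD ps (((lo + hi) / 2 : Nat) : Int) 0 = ps[(lo + hi) / 2] := by
        rw [PySem.List.pyGetD_natCast]
        exact List.getD_eq_getElem ps 0 hmid
      rw [hget]
      have hiff := sorted_lt_iff_countP i ps hpw ((lo + hi) / 2) hmid
      by_cases hc : ps[(lo + hi) / 2] < i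
      · have : (lo + hi) / 2 < ps.countP (fun x => decide (x < i)) := hiff.mp hc
        simp only [hc, if_true]
        exact ih ((lo + hi) / 2 + 1) hi (by omega) (by omega) hhi hlen
      · have : ¬ (lo + hi) / 2 < ps.countP (fun x => decide (x < i)) := fun h => hc (hiff.mpr h)
        simp only [hc, if_false]
        exact ih lo ((lo + hi) / 2) (by omega) hlo (by omega) (by omega)
    · simp [hlt]
      omega

lemma countBefore_eq_countP (ps : List Int) (i : Int) (hpw : ps.Pairwise (· < ·)) :
    pvCountBefore ps i = ps.countP (fun x => decide (x < i)) := by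
  unfold pvCountBefore
  exact loop_spec ps i hpw ps.length 0 ps.length (by omega) (by omega)
    (List.countP_le_length) (le_refl _)

-- counting positions `< s + k` among the enumerated occurrences of v = counting v in the k-prefix
lemma countP_pvPos_aux (v : String) : ∀ (l : List String) (s : Int) (k : Nat),
    ((PySem.List.enumerate l s).filterMap
        (fun p => if p.2 == v then some p.1 else none)).countP
        (fun x => decide (x < s + (k : Int)))
      = (l.take k).count v := by
  intro l
  induction l with
  | nil => intro s k; simp [PySem.List.enumerate_nil]
  | cons m ms ih =>
    intro s k
    rw [PySem.List.enumerate_cons]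
    have hge : ∀ x ∈ (PySem.List.enumerate ms (s + 1)).filterMap
        (fun p => if p.2 == v then some p.1 else none), s + 1 ≤ x := by
      intro x hx
      rcases List.mem_filterMap.mp hx with ⟨p, hp, hpx⟩
      have hx1 : p.1 = x := by
        by_cases h : (p.2 == v) = true
        · simpa [h] using hpx
        · simp [h] at hpx
      rcases (PySem.List.mem_enumerate_iff ms (s + 1) p).mp hp with ⟨j, hj, rfl⟩
      simp only at hx1
      omega
    cases k with
    | zero =>
      simp only [List.take_zero, List.count_nil, Nat.cast_zero, add_zero]
      refine List.countP_eq_zero.mpr ?_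
      intro x hx
      simp only [List.filterMap_cons] at hx
      by_cases h : (m == v) = true
      · simp only [h, if_true] at hx
        rcases List.mem_cons.mp hx with rfl | hx'
        · simp
        · have := hge x hx'; simp only [decide_eq_true_eq]; omega
      · simp only [h] at hx
        have := hge x hx
        simp only [decide_eq_true_eq]; omega
    | succ k =>
      have harith : s + (((k + 1 : Nat)) : Int) = (s + 1) + (k : Int) := by push_cast; ring
      have hfun : (fun x : Int => decide (x < s + ((k + 1 : Nat) : Int)))
          = (fun x : Int => decide (x < (s + 1) + (k : Int))) := by
        funext x; rw [harith]
      rw [List.take_succ_cons, List.count_cons, List.filterMap_cons]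
      by_cases h : (m == v) = true
      · rw [if_pos h, List.countP_cons, hfun, ih (s + 1) k]
        simp only [h, if_true]
        simp
      · rw [if_neg h, hfun, ih (s + 1) k, if_neg h]
        simp

lemma countBefore_pvPos (v : String) (moves : List String) (k : Nat) :
    pvCountBefore (pvPos v moves) (k : Int) = (moves.take k).count v := by
  rw [countBefore_eq_countP _ _ (pvPos_pairwise v moves)]
  have := countP_pvPos_aux v moves 0 k
  simpa [pvPos] using this

-- ===== VERDICT =====
theorem move_translate_spec : Claim_equal_move_translate := by
  intro c1 c2 moves _
  unfold Spec_move_translate move_translate move_translate_alt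
  dsimp only
  set start := if pyTupLe c1 c2 then c1 else c2 with hs
  have hA : (if pyTupLe c1 c2 then [c1, c2] else [c2, c1]).headI = start := by
    by_cases h : pyTupLe c1 c2 <;> simp [hs, h]
  rw [hA, foldA_eq]
  have hr : PySem.List.pyRange 0 ((moves.length : Int) + 1) 1
      = (List.range (moves.length + 1)).map (fun k : Nat => (k : Int)) := by
    rw [PySem.List.pyRange_one]
    have hn : (((moves.length : Int) + 1) - 0).toNat = moves.length + 1 := by omega
    rw [hn]
    exact List.map_congr_left (fun k _ => by simp)
  rw [hr, List.map_map, List.singleton_append, scan_eq_map]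
  refine List.map_congr_left ?_
  intro k _
  simp only [Function.comp, pvIdx, countBefore_pvPos]
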